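-- pv_equiv track=rewrite | github.com/AhhhHmmm/SarahProject | scoreCRver2.py | getScoreDictionary
-- ===== SOURCE A (Python) =====
-- def getScoreDictionary(answers):
-- 	scoreDictionary = {
-- 		'Emotional Deprivation' : 0,
-- 		'Abandonment' : 0,
-- 		'Mistrust/Abuse' : 0,
-- 		'Social Isolation' : 0,
-- 		'Defectiveness' : 0,
-- 		'Failure' : 0,
-- 		'Dependence' : 0,
-- 		'Vulnerability' : 0,
-- 		'Enmeshment' : 0,
-- 		'Subjugation' : 0,
-- 		'Self-Sacrifice' : 0,
-- 		'Emotional Inhibition' : 0,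
-- 		'Unrelenting Standards' : 0,
-- 		'Entitlement' : 0,
-- 		'Insufficient Self-Control' : 0,
-- 		'Approval-Seeking' : 0,
-- 		'Negativity/Pessimism' : 0,
-- 		'Punitiveness' : 0,
-- 	}
-- 	for index, answer in enumerate(answers):
-- 		questionNumber = index + 1
-- 		if questionNumber <= 9 and answer > 3:
-- 			scoreDictionary['Emotional Deprivation'] += answer
-- 		elif questionNumber <= 26 and answer > 3:
-- 			scoreDictionary['Abandonment'] += answer
-- 		elif questionNumber <= 43 and answer > 3:
-- 			scoreDictionary['Mistrust/Abuse'] += answer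
-- 		elif questionNumber <= 53 and answer > 3:
-- 			scoreDictionary['Social Isolation'] += answer
-- 		elif questionNumber <= 68 and answer > 3:
-- 			scoreDictionary['Defectiveness'] += answer
-- 		elif questionNumber <= 77 and answer > 3:
-- 			scoreDictionary['Failure'] += answer
-- 		elif questionNumber <= 92 and answer > 3:
-- 			scoreDictionary['Dependence'] += answer
-- 		elif questionNumber <= 104 and answer > 3:
-- 			scoreDictionary['Vulnerability'] += answer
-- 		elif questionNumber <= 115 and answer > 3:
-- 			scoreDictionary['Enmeshment'] += answer
-- 		elif questionNumber <= 125 and answer > 3: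
-- 			scoreDictionary['Subjugation'] += answer
-- 		elif questionNumber <= 142 and answer > 3:
-- 			scoreDictionary['Self-Sacrifice'] += answer
-- 		elif questionNumber <= 151 and answer > 3:
-- 			scoreDictionary['Emotional Inhibition'] += answer
-- 		elif questionNumber <= 167 and answer > 3:
-- 			scoreDictionary['Unrelenting Standards'] += answer
-- 		elif questionNumber <= 178 and answer > 3:
-- 			scoreDictionary['Entitlement'] += answer
-- 		elif questionNumber <= 193 and answer > 3:
-- 			scoreDictionary['Insufficient Self-Control'] += answer
-- 		elif questionNumber <= 207 and answer > 3:
-- 			scoreDictionary['Approval-Seeking'] += answer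
-- 		elif questionNumber <= 218 and answer > 3:
-- 			scoreDictionary['Negativity/Pessimism'] += answer
-- 		elif questionNumber <= 232 and answer > 3:
-- 			scoreDictionary['Punitiveness'] += answer
-- 	return scoreDictionary
-- ===== SOURCE B (Python) =====
-- NAMES = ['Emotional Deprivation', 'Abandonment', 'Mistrust/Abuse', 'Social Isolation',
--          'Defectiveness', 'Failure', 'Dependence', 'Vulnerability', 'Enmeshment',
--          'Subjugation', 'Self-Sacrifice', 'Emotional Inhibition', 'Unrelenting Standards',
--          'Entitlement', 'Insufficient Self-Control', 'Approval-Seeking',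
--          'Negativity/Pessimism', 'Punitiveness']
--
-- BOUNDS = [9, 26, 43, 53, 68, 77, 92, 104, 115, 125, 142, 151, 167, 178, 193, 207, 218, 232]
--
--
-- def getScoreDictionary(answers):
--     scores = {name: 0 for name in NAMES}
--     for index, answer in enumerate(answers):
--         if answer > 3:
--             # binary search: first bucket whose upper bound >= question number
--             lo, hi = 0, len(BOUNDS)
--             q = index + 1
--             while lo < hi:
--                 mid = (lo + hi) // 2
--                 if BOUNDS[mid] < q:
--                     lo = mid + 1
--                 else:
--                     hi = mid
--             if lo < len(BOUNDS):
--                 scores[NAMES[lo]] += answer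
--     return scores
-- ===== Notes on version B (the rewrite author's own statement) =====
-- stated objective: alternative
-- what changed: Replaces A's 18-branch if/elif chain with a boundaries table, a name table, a dict pre-seeded from the name table, and a hand-written binary search per answer that finds the bucket index.
import Mathlib
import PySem

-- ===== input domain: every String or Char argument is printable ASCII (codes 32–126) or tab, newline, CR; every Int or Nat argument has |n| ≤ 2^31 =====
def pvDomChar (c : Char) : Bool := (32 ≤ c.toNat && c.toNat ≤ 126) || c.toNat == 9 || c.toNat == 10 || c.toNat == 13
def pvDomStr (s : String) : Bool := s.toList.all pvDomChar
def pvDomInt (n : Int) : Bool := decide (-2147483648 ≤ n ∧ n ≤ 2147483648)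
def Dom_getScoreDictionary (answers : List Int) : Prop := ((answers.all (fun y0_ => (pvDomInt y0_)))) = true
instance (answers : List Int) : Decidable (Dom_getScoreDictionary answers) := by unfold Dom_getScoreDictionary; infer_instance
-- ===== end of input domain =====

-- B replaces A's 18-branch elif chain by a boundaries table, a pre-seeded dict and a
-- hand-written binary search per answer (objective: idiomatic/alternative, not faster).

-- ===== PORT A =====
def getScoreDictionary (answers : List Int) : List (String × Int) :=
  let d0 : PySem.Dict String Int := PySem.Dict.ofList
    [("Emotional Deprivation", 0), ("Abandonment", 0), ("Mistrust/Abuse", 0),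
     ("Social Isolation", 0), ("Defectiveness", 0), ("Failure", 0), ("Dependence", 0),
     ("Vulnerability", 0), ("Enmeshment", 0), ("Subjugation", 0), ("Self-Sacrifice", 0),
     ("Emotional Inhibition", 0), ("Unrelenting Standards", 0), ("Entitlement", 0),
     ("Insufficient Self-Control", 0), ("Approval-Seeking", 0),
     ("Negativity/Pessimism", 0), ("Punitiveness", 0)]
  -- d[k] += answer: the key is always present, so Dict.modify k 0 (· + answer) is exact
  ((PySem.List.enumerate answers 0).foldl (fun d p =>
      let questionNumber := p.1 + 1
      let answer := p.2
      if questionNumber ≤ 9 ∧ answer > 3 then d.modify "Emotional Deprivation" 0 (· + answer)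
      else if questionNumber ≤ 26 ∧ answer > 3 then d.modify "Abandonment" 0 (· + answer)
      else if questionNumber ≤ 43 ∧ answer > 3 then d.modify "Mistrust/Abuse" 0 (· + answer)
      else if questionNumber ≤ 53 ∧ answer > 3 then d.modify "Social Isolation" 0 (· + answer)
      else if questionNumber ≤ 68 ∧ answer > 3 then d.modify "Defectiveness" 0 (· + answer)
      else if questionNumber ≤ 77 ∧ answer > 3 then d.modify "Failure" 0 (· + answer)
      else if questionNumber ≤ 92 ∧ answer > 3 then d.modify "Dependence" 0 (· + answer)
      else if questionNumber ≤ 104 ∧ answer > 3 then d.modify "Vulnerability" 0 (· + answer)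
      else if questionNumber ≤ 115 ∧ answer > 3 then d.modify "Enmeshment" 0 (· + answer)
      else if questionNumber ≤ 125 ∧ answer > 3 then d.modify "Subjugation" 0 (· + answer)
      else if questionNumber ≤ 142 ∧ answer > 3 then d.modify "Self-Sacrifice" 0 (· + answer)
      else if questionNumber ≤ 151 ∧ answer > 3 then d.modify "Emotional Inhibition" 0 (· + answer)
      else if questionNumber ≤ 167 ∧ answer > 3 then d.modify "Unrelenting Standards" 0 (· + answer)
      else if questionNumber ≤ 178 ∧ answer > 3 then d.modify "Entitlement" 0 (· + answer)
      else if questionNumber ≤ 193 ∧ answer > 3 then d.modify "Insufficient Self-Control" 0 (· + answer)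
      else if questionNumber ≤ 207 ∧ answer > 3 then d.modify "Approval-Seeking" 0 (· + answer)
      else if questionNumber ≤ 218 ∧ answer > 3 then d.modify "Negativity/Pessimism" 0 (· + answer)
      else if questionNumber ≤ 232 ∧ answer > 3 then d.modify "Punitiveness" 0 (· + answer)
      else d) d0).items

-- ===== PORT B =====
def pvNames : List String :=
  ["Emotional Deprivation", "Abandonment", "Mistrust/Abuse", "Social Isolation",
   "Defectiveness", "Failure", "Dependence", "Vulnerability", "Enmeshment",
   "Subjugation", "Self-Sacrifice", "Emotional Inhibition", "Unrelenting Standards",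
   "Entitlement", "Insufficient Self-Control", "Approval-Seeking",
   "Negativity/Pessimism", "Punitiveness"]

def pvBounds : List Int := [9, 26, 43, 53, 68, 77, 92, 104, 115, 125, 142, 151, 167, 178, 193, 207, 218, 232]

-- the while-loop binary search of Source B, step for step (fuel = hi - lo bounds the
-- iterations and only makes the loop total; mid is always < xs.length when called as in
-- Source B, so List.getD mid 0 is exactly xs[mid])
def pvBisect (xs : List Int) (x : Int) : Nat → Nat → Nat → Nat
  | 0, lo, _ => lo
  | fuel + 1, lo, hi =>
    if lo < hi then
      let mid := (lo + hi) / 2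
      if xs.getD mid 0 < x then pvBisect xs x fuel (mid + 1) hi else pvBisect xs x fuel lo mid
    else lo

def getScoreDictionary_alt (answers : List Int) : List (String × Int) :=
  let d0 : PySem.Dict String Int := pvNames.foldl (fun d n => d.insert n 0) PySem.Dict.empty
  ((PySem.List.enumerate answers 0).foldl (fun d p =>
      if p.2 > 3 then
        let k := pvBisect pvBounds (p.1 + 1) 18 0 18
        -- NAMES[k] with k < 18: getD k "" is exactly the in-range index
        if k < 18 then d.modify (pvNames.getD k "") 0 (· + p.2) else d
      else d) d0).items

-- ===== PRECONDITION & SPEC =====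
def Spec_getScoreDictionary (answers : List Int) (out : List (String × Int)) : Prop := out = getScoreDictionary_alt answers
instance (answers : List Int) (out : List (String × Int)) : Decidable (Spec_getScoreDictionary answers out) := by unfold Spec_getScoreDictionary; infer_instance

-- ===== CLAIM (what is proved, stated in full; the proofs are below) =====
def Claim_equal_getScoreDictionary : Prop := ∀ (answers : List Int), Dom_getScoreDictionary answers → Spec_getScoreDictionary answers (getScoreDictionary answers)

-- ===== LEMMAS AND PROOFS =====

-- the binary search over the fixed boundary table, characterised as the bucket index
set_option maxRecDepth 4000 in
set_option maxHeartbeats 1000000 in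
lemma pvBisect_char (x : Int) : pvBisect pvBounds x 18 0 18 =
    if x ≤ 9 then 0 else if x ≤ 26 then 1 else if x ≤ 43 then 2 else if x ≤ 53 then 3
    else if x ≤ 68 then 4 else if x ≤ 77 then 5 else if x ≤ 92 then 6 else if x ≤ 104 then 7
    else if x ≤ 115 then 8 else if x ≤ 125 then 9 else if x ≤ 142 then 10 else if x ≤ 151 then 11
    else if x ≤ 167 then 12 else if x ≤ 178 then 13 else if x ≤ 193 then 14 else if x ≤ 207 then 15
    else if x ≤ 218 then 16 else if x ≤ 232 then 17 else 18 := by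
  by_cases hc0 : x ≤ 9
  · simp [pvBisect, pvBounds, hc0, show ¬((125:Int) < x) by omega, show ¬((68:Int) < x) by omega, show ¬((43:Int) < x) by omega, show ¬((26:Int) < x) by omega, show ¬((9:Int) < x) by omega]
  by_cases hc1 : x ≤ 26
  · simp [pvBisect, pvBounds, hc0, hc1, show ¬((125:Int) < x) by omega, show ¬((68:Int) < x) by omega, show ¬((43:Int) < x) by omega, show ¬((26:Int) < x) by omega, show (9:Int) < x by omega]
  by_cases hc2 : x ≤ 43
  · simp [pvBisect, pvBounds, hc0, hc1, hc2, show ¬((125:Int) < x) by omega, show ¬((68:Int) < x) by omega, show ¬((43:Int) < x) by omega, show (26:Int) < x by omega]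
  by_cases hc3 : x ≤ 53
  · simp [pvBisect, pvBounds, hc0, hc1, hc2, hc3, show ¬((125:Int) < x) by omega, show ¬((68:Int) < x) by omega, show (43:Int) < x by omega, show ¬((53:Int) < x) by omega]
  by_cases hc4 : x ≤ 68
  · simp [pvBisect, pvBounds, hc0, hc1, hc2, hc3, hc4, show ¬((125:Int) < x) by omega, show ¬((68:Int) < x) by omega, show (43:Int) < x by omega, show (53:Int) < x by omega]
  by_cases hc5 : x ≤ 77
  · simp [pvBisect, pvBounds, hc0, hc1, hc2, hc3, hc4, hc5, show ¬((125:Int) < x) by omega, show (68:Int) < x by omega, show ¬((104:Int) < x) by omega, show ¬((92:Int) < x) by omega, show ¬((77:Int) < x) by omega]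
  by_cases hc6 : x ≤ 92
  · simp [pvBisect, pvBounds, hc0, hc1, hc2, hc3, hc4, hc5, hc6, show ¬((125:Int) < x) by omega, show (68:Int) < x by omega, show ¬((104:Int) < x) by omega, show ¬((92:Int) < x) by omega, show (77:Int) < x by omega]
  by_cases hc7 : x ≤ 104
  · simp [pvBisect, pvBounds, hc0, hc1, hc2, hc3, hc4, hc5, hc6, hc7, show ¬((125:Int) < x) by omega, show (68:Int) < x by omega, show ¬((104:Int) < x) by omega, show (92:Int) < x by omega]
  by_cases hc8 : x ≤ 115
  · simp [pvBisect, pvBounds, hc0, hc1, hc2, hc3, hc4, hc5, hc6, hc7, hc8, show ¬((125:Int) < x) by omega, show (68:Int) < x by omega, show (104:Int) < x by omega, show ¬((115:Int) < x) by omega]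
  by_cases hc9 : x ≤ 125
  · simp [pvBisect, pvBounds, hc0, hc1, hc2, hc3, hc4, hc5, hc6, hc7, hc8, hc9, show ¬((125:Int) < x) by omega, show (68:Int) < x by omega, show (104:Int) < x by omega, show (115:Int) < x by omega]
  by_cases hc10 : x ≤ 142
  · simp [pvBisect, pvBounds, hc0, hc1, hc2, hc3, hc4, hc5, hc6, hc7, hc8, hc9, hc10, show (125:Int) < x by omega, show ¬((193:Int) < x) by omega, show ¬((167:Int) < x) by omega, show ¬((151:Int) < x) by omega, show ¬((142:Int) < x) by omega]
  by_cases hc11 : x ≤ 151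
  · simp [pvBisect, pvBounds, hc0, hc1, hc2, hc3, hc4, hc5, hc6, hc7, hc8, hc9, hc10, hc11, show (125:Int) < x by omega, show ¬((193:Int) < x) by omega, show ¬((167:Int) < x) by omega, show ¬((151:Int) < x) by omega, show (142:Int) < x by omega]
  by_cases hc12 : x ≤ 167
  · simp [pvBisect, pvBounds, hc0, hc1, hc2, hc3, hc4, hc5, hc6, hc7, hc8, hc9, hc10, hc11, hc12, show (125:Int) < x by omega, show ¬((193:Int) < x) by omega, show ¬((167:Int) < x) by omega, show (151:Int) < x by omega]
  by_cases hc13 : x ≤ 178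
  · simp [pvBisect, pvBounds, hc0, hc1, hc2, hc3, hc4, hc5, hc6, hc7, hc8, hc9, hc10, hc11, hc12, hc13, show (125:Int) < x by omega, show ¬((193:Int) < x) by omega, show (167:Int) < x by omega, show ¬((178:Int) < x) by omega]
  by_cases hc14 : x ≤ 193
  · simp [pvBisect, pvBounds, hc0, hc1, hc2, hc3, hc4, hc5, hc6, hc7, hc8, hc9, hc10, hc11, hc12, hc13, hc14, show (125:Int) < x by omega, show ¬((193:Int) < x) by omega, show (167:Int) < x by omega, show (178:Int) < x by omega]
  by_cases hc15 : x ≤ 207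
  · simp [pvBisect, pvBounds, hc0, hc1, hc2, hc3, hc4, hc5, hc6, hc7, hc8, hc9, hc10, hc11, hc12, hc13, hc14, hc15, show (125:Int) < x by omega, show (193:Int) < x by omega, show ¬((218:Int) < x) by omega, show ¬((207:Int) < x) by omega]
  by_cases hc16 : x ≤ 218
  · simp [pvBisect, pvBounds, hc0, hc1, hc2, hc3, hc4, hc5, hc6, hc7, hc8, hc9, hc10, hc11, hc12, hc13, hc14, hc15, hc16, show (125:Int) < x by omega, show (193:Int) < x by omega, show ¬((218:Int) < x) by omega, show (207:Int) < x by omega]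
  by_cases hc17 : x ≤ 232
  · simp [pvBisect, pvBounds, hc0, hc1, hc2, hc3, hc4, hc5, hc6, hc7, hc8, hc9, hc10, hc11, hc12, hc13, hc14, hc15, hc16, hc17, show (125:Int) < x by omega, show (193:Int) < x by omega, show (218:Int) < x by omega, show ¬((232:Int) < x) by omega]
  simp [pvBisect, pvBounds, hc0, hc1, hc2, hc3, hc4, hc5, hc6, hc7, hc8, hc9, hc10, hc11, hc12, hc13, hc14, hc15, hc16, hc17, show (125:Int) < x by omega, show (193:Int) < x by omega, show (218:Int) < x by omega, show (232:Int) < x by omega]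


-- ===== VERDICT (by name: the statement is the Claim_ definition above) =====
set_option maxHeartbeats 2000000 in
theorem getScoreDictionary_spec : Claim_equal_getScoreDictionary := by
  intro answers _
  show getScoreDictionary answers = getScoreDictionary_alt answers
  simp only [getScoreDictionary, getScoreDictionary_alt]
  congr 1
  rw [show (List.foldl (fun (d : PySem.Dict String Int) n => d.insert n 0) PySem.Dict.empty pvNames) =
      PySem.Dict.ofList
        [("Emotional Deprivation", 0), ("Abandonment", 0), ("Mistrust/Abuse", 0),
         ("Social Isolation", 0), ("Defectiveness", 0), ("Failure", 0), ("Dependence", 0),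
         ("Vulnerability", 0), ("Enmeshment", 0), ("Subjugation", 0), ("Self-Sacrifice", 0),
         ("Emotional Inhibition", 0), ("Unrelenting Standards", 0), ("Entitlement", 0),
         ("Insufficient Self-Control", 0), ("Approval-Seeking", 0),
         ("Negativity/Pessimism", 0), ("Punitiveness", 0)] from by decide]
  apply PySem.List.foldl_congr_mem
  intro d p _
  rcases p with ⟨i, a⟩
  by_cases ha : a > 3
  · dsimp only
    by_cases hq0 : i + 1 ≤ 9
    · simp only [pvBisect_char, ha, hq0, and_true, if_true]
      norm_num [pvNames]
    by_cases hq1 : i + 1 ≤ 26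
    · simp only [pvBisect_char, ha, hq0, hq1, and_true, if_true, if_false]
      norm_num [pvNames]
    by_cases hq2 : i + 1 ≤ 43
    · simp only [pvBisect_char, ha, hq0, hq1, hq2, and_true, if_true, if_false]
      norm_num [pvNames]
    by_cases hq3 : i + 1 ≤ 53
    · simp only [pvBisect_char, ha, hq0, hq1, hq2, hq3, and_true, if_true, if_false]
      norm_num [pvNames]
    by_cases hq4 : i + 1 ≤ 68
    · simp only [pvBisect_char, ha, hq0, hq1, hq2, hq3, hq4, and_true, if_true, if_false]
      norm_num [pvNames]
    by_cases hq5 : i + 1 ≤ 77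
    · simp only [pvBisect_char, ha, hq0, hq1, hq2, hq3, hq4, hq5, and_true, if_true, if_false]
      norm_num [pvNames]
    by_cases hq6 : i + 1 ≤ 92
    · simp only [pvBisect_char, ha, hq0, hq1, hq2, hq3, hq4, hq5, hq6, and_true, if_true, if_false]
      norm_num [pvNames]
    by_cases hq7 : i + 1 ≤ 104
    · simp only [pvBisect_char, ha, hq0, hq1, hq2, hq3, hq4, hq5, hq6, hq7, and_true, if_true, if_false]
      norm_num [pvNames]
    by_cases hq8 : i + 1 ≤ 115
    · simp only [pvBisect_char, ha, hq0, hq1, hq2, hq3, hq4, hq5, hq6, hq7, hq8, and_true, if_true, if_false]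
      norm_num [pvNames]
    by_cases hq9 : i + 1 ≤ 125
    · simp only [pvBisect_char, ha, hq0, hq1, hq2, hq3, hq4, hq5, hq6, hq7, hq8, hq9, and_true, if_true, if_false]
      norm_num [pvNames]
    by_cases hq10 : i + 1 ≤ 142
    · simp only [pvBisect_char, ha, hq0, hq1, hq2, hq3, hq4, hq5, hq6, hq7, hq8, hq9, hq10, and_true, if_true, if_false]
      norm_num [pvNames]
    by_cases hq11 : i + 1 ≤ 151
    · simp only [pvBisect_char, ha, hq0, hq1, hq2, hq3, hq4, hq5, hq6, hq7, hq8, hq9, hq10, hq11, and_true, if_true, if_false]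
      norm_num [pvNames]
    by_cases hq12 : i + 1 ≤ 167
    · simp only [pvBisect_char, ha, hq0, hq1, hq2, hq3, hq4, hq5, hq6, hq7, hq8, hq9, hq10, hq11, hq12, and_true, if_true, if_false]
      norm_num [pvNames]
    by_cases hq13 : i + 1 ≤ 178
    · simp only [pvBisect_char, ha, hq0, hq1, hq2, hq3, hq4, hq5, hq6, hq7, hq8, hq9, hq10, hq11, hq12, hq13, and_true, if_true, if_false]
      norm_num [pvNames]
    by_cases hq14 : i + 1 ≤ 193
    · simp only [pvBisect_char, ha, hq0, hq1, hq2, hq3, hq4, hq5, hq6, hq7, hq8, hq9, hq10, hq11, hq12, hq13, hq14, and_true, if_true, if_false]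
      norm_num [pvNames]
    by_cases hq15 : i + 1 ≤ 207
    · simp only [pvBisect_char, ha, hq0, hq1, hq2, hq3, hq4, hq5, hq6, hq7, hq8, hq9, hq10, hq11, hq12, hq13, hq14, hq15, and_true, if_true, if_false]
      norm_num [pvNames]
    by_cases hq16 : i + 1 ≤ 218
    · simp only [pvBisect_char, ha, hq0, hq1, hq2, hq3, hq4, hq5, hq6, hq7, hq8, hq9, hq10, hq11, hq12, hq13, hq14, hq15, hq16, and_true, if_true, if_false]
      norm_num [pvNames]
    by_cases hq17 : i + 1 ≤ 232
    · simp only [pvBisect_char, ha, hq0, hq1, hq2, hq3, hq4, hq5, hq6, hq7, hq8, hq9, hq10, hq11, hq12, hq13, hq14, hq15, hq16, hq17, and_true, if_true, if_false]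
      norm_num [pvNames]
    simp only [pvBisect_char, ha, hq0, hq1, hq2, hq3, hq4, hq5, hq6, hq7, hq8, hq9, hq10, hq11, hq12, hq13, hq14, hq15, hq16, hq17, and_true, if_true, if_false]
    norm_num
  · dsimp only
    simp [ha]
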